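-- pv_equiv track=rewrite | github.com/toriiend/DaPToool | local_analyzer.py | _find_param_signals
-- ===== SOURCE A (Python) =====
-- from typing import Any, Dict, List, Optional
--
-- def _find_param_signals(html: str) -> List[str]:
--     suspects = ["url=", "uri=", "dest=", "destination=", "next=", "continue=", "callback=", "return=", "redirect="]
--     found = []
--     low = html.lower()
--     for s in suspects:
--         if s in low:
--             found.append(s.strip("="))
--     return sorted(set(found))
-- ===== SOURCE B (Python) =====
-- def _find_param_signals(html: str):
--     suspects = ["url=", "uri=", "dest=", "destination=", "next=", "continue=", "callback=", "return=", "redirect="]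
--     low = html.lower()
--     hits = set()
--     for i in range(len(low)):
--         for s in suspects:
--             if low.startswith(s, i):
--                 hits.add(s[:-1])
--     return sorted(hits)
-- ===== Notes on version B (the rewrite author's own statement) =====
-- stated objective: alternative
-- what changed: B makes one left-to-right pass over the lowered HTML, at each position testing which suspect literals start there and adding the stripped name to a set, instead of A running nine independent substring-containment scans that append to a list and then sort the set.
import Mathlib
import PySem

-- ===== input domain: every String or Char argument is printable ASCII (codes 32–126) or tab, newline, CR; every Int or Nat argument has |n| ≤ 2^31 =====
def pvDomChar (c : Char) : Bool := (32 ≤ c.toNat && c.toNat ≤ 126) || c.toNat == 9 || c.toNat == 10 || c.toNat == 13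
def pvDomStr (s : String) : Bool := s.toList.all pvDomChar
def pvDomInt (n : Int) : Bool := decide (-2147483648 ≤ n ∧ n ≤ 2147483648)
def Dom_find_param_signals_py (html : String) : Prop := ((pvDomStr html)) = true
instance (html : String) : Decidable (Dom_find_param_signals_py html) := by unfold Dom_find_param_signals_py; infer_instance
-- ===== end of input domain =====

-- B replaces A's nine independent `in` substring scans by one left-to-right pass that
-- collects matches into a set at each position (objective: alternative, same cost).

-- ===== PORT A =====
def pvSuspectsA : List String :=
  ["url=", "uri=", "dest=", "destination=", "next=", "continue=", "callback=", "return=", "redirect="]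

def find_param_signals_py (html : String) : List String :=
  let low := PySem.Str.lower html
  let found := pvSuspectsA.foldl
    (fun acc s => if PySem.Str.isIn s low then acc ++ [PySem.Str.stripChars s "="] else acc)
    ([] : List String)
  PySem.List.sorted (PySem.Set.ofList found) (fun x => x) false

-- ===== PORT B =====
def pvSuspectsB : List String :=
  ["url=", "uri=", "dest=", "destination=", "next=", "continue=", "callback=", "return=", "redirect="]

-- `low.startswith(s, i)` with 0 ≤ i < len(low) is ported exactly as startswith on the drop at i.
def find_param_signals_py_alt (html : String) : List String :=
  let low := PySem.Str.lower html
  let hits := (PySem.List.pyRange 0 (PySem.Str.len low) 1).foldl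
    (fun h i => pvSuspectsB.foldl
      (fun h s => if PySem.Chars.startswith (low.toList.drop i.toNat) s.toList then
          PySem.Set.add h (PySem.Str.slice s none (some (-1))) else h) h)
    PySem.Set.empty
  PySem.List.sorted hits (fun x => x) false

-- ===== PRECONDITION & SPEC =====
def Spec_find_param_signals_py (html : String) (out : List String) : Prop := out = find_param_signals_py_alt html
instance (html : String) (out : List String) : Decidable (Spec_find_param_signals_py html out) := by unfold Spec_find_param_signals_py; infer_instance

-- ===== CLAIM (what is proved, stated in full; the proofs are below) =====
def Claim_equal_find_param_signals_py : Prop := ∀ (html : String), Dom_find_param_signals_py html → Spec_find_param_signals_py html (find_param_signals_py html)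

-- ===== LEMMAS AND PROOFS =====

-- membership through a foldl whose step is characterised pointwise
lemma pv_mem_foldl_step {β : Type} (P : β → String → Prop)
    (step : PySem.Set String → β → PySem.Set String)
    (hstep : ∀ h b x, x ∈ step h b ↔ x ∈ h ∨ P b x) :
    ∀ (l : List β) (h : PySem.Set String) (x : String),
      x ∈ l.foldl step h ↔ x ∈ h ∨ ∃ b ∈ l, P b x := by
  intro l
  induction l with
  | nil => intro h x; simp
  | cons b t ih =>
      intro h x
      rw [List.foldl_cons, ih, hstep]
      simp only [List.mem_cons]
      constructor
      · rintro ((hx | hx) | ⟨c, hc, hPc⟩)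
        · exact Or.inl hx
        · exact Or.inr ⟨b, Or.inl rfl, hx⟩
        · exact Or.inr ⟨c, Or.inr hc, hPc⟩
      · rintro (hx | ⟨c, (rfl | hc), hPc⟩)
        · exact Or.inl (Or.inl hx)
        · exact Or.inl (Or.inr hPc)
        · exact Or.inr ⟨c, hc, hPc⟩

lemma pv_nodup_foldl_step {β : Type}
    (step : PySem.Set String → β → PySem.Set String)
    (hstep : ∀ h b, h.Nodup → (step h b).Nodup) :
    ∀ (l : List β) (h : PySem.Set String), h.Nodup → (l.foldl step h).Nodup := by
  intro l
  induction l with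
  | nil => intro h hh; simpa
  | cons b t ih => intro h hh; exact ih _ (hstep h b hh)

-- the inner loop over the suspects, for one position i
lemma pv_mem_inner (low : List Char) (i : Int) (h : PySem.Set String) (x : String) :
    x ∈ pvSuspectsB.foldl
      (fun h s => if PySem.Chars.startswith (low.drop i.toNat) s.toList then
          PySem.Set.add h (PySem.Str.slice s none (some (-1))) else h) h
    ↔ x ∈ h ∨ ∃ s ∈ pvSuspectsB,
        PySem.Chars.startswith (low.drop i.toNat) s.toList = true ∧
        x = PySem.Str.slice s none (some (-1)) := by
  apply pv_mem_foldl_step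
    (fun s x => PySem.Chars.startswith (low.drop i.toNat) s.toList = true ∧
        x = PySem.Str.slice s none (some (-1)))
  intro h s x
  by_cases hc : PySem.Chars.startswith (low.drop i.toNat) s.toList = true
  · simp [hc, PySem.Set.mem_add]
  · simp [hc]

lemma pv_nodup_inner (low : List Char) (i : Int) (h : PySem.Set String) (hh : h.Nodup) :
    (pvSuspectsB.foldl
      (fun h s => if PySem.Chars.startswith (low.drop i.toNat) s.toList then
          PySem.Set.add h (PySem.Str.slice s none (some (-1))) else h) h).Nodup := by
  refine pv_nodup_foldl_step _ ?_ _ _ hh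
  intro h s hs
  split
  · apply PySem.Set.nodup_add
    exact hs
  · exact hs

-- `s in low` iff some scanned position starts with s (for nonempty s)
lemma pv_isIn_iff (low s : String) (hs : s.toList ≠ []) :
    PySem.Str.isIn s low = true ↔
      ∃ i ∈ PySem.List.pyRange 0 (PySem.Str.len low) 1,
        PySem.Chars.startswith (low.toList.drop i.toNat) s.toList = true := by
  constructor
  · intro h
    have h' : PySem.Chars.isIn s.toList low.toList = true := by simpa using h
    obtain ⟨j, hj⟩ := (PySem.Chars.exists_prefix_drop_iff_isIn s.toList low.toList).2 h'
    have hjlt : j < low.toList.length := by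
      by_contra hge
      have : low.toList.drop j = [] := List.drop_eq_nil_of_le (le_of_not_gt hge)
      rw [this] at hj
      exact hs (List.prefix_nil.mp hj)
    refine ⟨(j : Int), ?_, ?_⟩
    · rw [PySem.List.mem_pyRange_one]
      constructor
      · exact Int.natCast_nonneg j
      · simpa [PySem.Str.len] using (by exact_mod_cast hjlt : (j : Int) < (low.toList.length : Int))
    · rw [PySem.Chars.startswith_iff]
      simpa using hj
  · rintro ⟨i, hi, hsw⟩
    have hpre := (PySem.Chars.startswith_iff _ _).1 hsw
    have : ∃ j, s.toList <+: low.toList.drop j := ⟨i.toNat, hpre⟩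
    have h' := (PySem.Chars.exists_prefix_drop_iff_isIn s.toList low.toList).1 this
    simpa using h'

-- per-suspect facts: nonempty, and strip("=") agrees with [:-1]
lemma pv_susp_facts : ∀ s ∈ pvSuspectsB,
    s.toList ≠ [] ∧ PySem.Str.stripChars s "=" = PySem.Str.slice s none (some (-1)) := by
  decide

lemma pv_suspAB : pvSuspectsA = pvSuspectsB := rfl

-- ===== VERDICT (by name: the statement is the Claim_ definition above) =====
theorem find_param_signals_py_spec : Claim_equal_find_param_signals_py := by
  intro html _
  unfold Spec_find_param_signals_py find_param_signals_py find_param_signals_py_alt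
  simp only []
  set low := PySem.Str.lower html with hlow
  -- A's found list
  rw [PySem.List.foldl_append_if]
  set found := (pvSuspectsA.filter (fun s => PySem.Str.isIn s low)).map
      (fun s => PySem.Str.stripChars s "=") with hfound
  set hits := (PySem.List.pyRange 0 (PySem.Str.len low) 1).foldl
    (fun h i => pvSuspectsB.foldl
      (fun h s => if PySem.Chars.startswith (low.toList.drop i.toNat) s.toList then
          PySem.Set.add h (PySem.Str.slice s none (some (-1))) else h) h)
    PySem.Set.empty with hhits
  -- membership characterisation of hits
  have hmem : ∀ x, x ∈ hits ↔ ∃ i ∈ PySem.List.pyRange 0 (PySem.Str.len low) 1,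
      ∃ s ∈ pvSuspectsB, PySem.Chars.startswith (low.toList.drop i.toNat) s.toList = true ∧
        x = PySem.Str.slice s none (some (-1)) := by
    intro x
    rw [hhits]
    rw [pv_mem_foldl_step
      (fun i x => ∃ s ∈ pvSuspectsB,
          PySem.Chars.startswith (low.toList.drop i.toNat) s.toList = true ∧
          x = PySem.Str.slice s none (some (-1)))
      _ (fun h i x => pv_mem_inner low.toList i h x)]
    simp [PySem.Set.empty]
  have hnodup : hits.Nodup := by
    rw [hhits]
    refine pv_nodup_foldl_step _ ?_ _ _ (by simp [PySem.Set.empty])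
    intro h i hh; exact pv_nodup_inner low.toList i h hh
  -- same members
  have hiff : ∀ x, x ∈ hits ↔ x ∈ PySem.Set.ofList ([] ++ found) := by
    intro x
    rw [hmem x, PySem.Set.mem_ofList]
    simp only [List.nil_append, hfound, List.mem_map, List.mem_filter]
    constructor
    · rintro ⟨i, hi, s, hsmem, hsw, rfl⟩
      obtain ⟨hne, hstrip⟩ := pv_susp_facts s hsmem
      refine ⟨s, ⟨by rwa [pv_suspAB], ?_⟩, hstrip.symm ▸ rfl⟩
      exact (pv_isIn_iff low s hne).2 ⟨i, hi, hsw⟩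
    · rintro ⟨s, ⟨hsmem, hin⟩, rfl⟩
      rw [pv_suspAB] at hsmem
      obtain ⟨hne, hstrip⟩ := pv_susp_facts s hsmem
      obtain ⟨i, hi, hsw⟩ := (pv_isIn_iff low s hne).1 hin
      exact ⟨i, hi, s, hsmem, hsw, hstrip ▸ rfl⟩
  have hperm : (PySem.Set.ofList ([] ++ found)).Perm hits := by
    rw [List.perm_ext_iff_of_nodup (PySem.Set.nodup_ofList _) hnodup]
    intro x; exact (hiff x).symm
  exact PySem.List.sorted_eq_sorted_of_perm _ _ _ (fun a b h => h) hperm
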